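-- pv_equiv track=rewrite | github.com/nguyenduchuyiu/ai4math | utils/auto_sorrifier.py | _clean_redundant_sorries
-- ===== SOURCE A (Python) =====
-- from typing import Tuple, List, Dict, Optional
--
-- def _clean_redundant_sorries(lines: List[str]) -> str:
--     """
--     Removes duplicated `sorry` lines and empty lines generated during automated fixes.
--     """
--     cleaned = []
--     for line in lines:
--         if line == "":
--             continue
--         if line.strip() == "sorry" and cleaned and cleaned[-1].strip() == "sorry":
--             continue
--         cleaned.append(line)
--     return "\n".join(cleaned) + "\n"
-- ===== SOURCE B (Python) =====
-- from itertools import groupby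
--
-- def _clean_redundant_sorries(lines):
--     """
--     Removes duplicated `sorry` lines and empty lines generated during automated fixes.
--     """
--     result = []
--     for is_sorry, group in groupby((l for l in lines if l != ""),
--                                    key=lambda l: l.strip() == "sorry"):
--         if is_sorry:
--             result.append(next(group))   # keep only the first line of a sorry-run
--         else:
--             result.extend(group)
--     return "\n".join(result) + "\n"
-- ===== Notes on version B (the rewrite author's own statement) =====
-- stated objective: idiomatic
-- what changed: Replaces the single accumulator loop that inspects cleaned[-1] with a stateless pipeline: filter out empty lines, then itertools.groupby keyed on being a sorry line, emitting the first line of each sorry-run and all lines of other runs.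
import Mathlib
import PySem

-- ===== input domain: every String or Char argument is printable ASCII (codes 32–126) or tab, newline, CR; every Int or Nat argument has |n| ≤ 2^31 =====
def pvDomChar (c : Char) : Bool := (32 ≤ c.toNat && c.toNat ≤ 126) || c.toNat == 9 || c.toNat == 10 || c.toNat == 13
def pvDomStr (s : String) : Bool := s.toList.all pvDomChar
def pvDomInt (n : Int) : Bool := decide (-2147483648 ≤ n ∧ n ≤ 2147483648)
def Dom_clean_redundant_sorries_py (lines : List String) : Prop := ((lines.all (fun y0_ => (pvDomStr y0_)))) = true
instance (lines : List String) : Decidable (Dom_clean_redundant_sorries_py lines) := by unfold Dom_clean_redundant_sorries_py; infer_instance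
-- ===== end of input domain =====

-- B replaces A's accumulator loop (which inspects cleaned[-1]) with a filter pass followed by
-- a groupby-style run collapse; objective: idiomatic, same cost.


-- shared by both Pythons: `l.strip() == "sorry"`
def pvIsSorry (l : String) : Bool := PySem.Str.strip l == "sorry"

-- ===== PORT A =====
-- A's loop: skip "" lines; skip a sorry line when cleaned is nonempty and cleaned[-1] strips to
-- "sorry" (cleaned[-1] under that nonemptiness guard is getLast?); else append.
def clean_redundant_sorries_py (lines : List String) : String :=
  let cleaned := lines.foldl (fun cleaned line =>
    if line = "" then cleaned
    else if pvIsSorry line && !cleaned.isEmpty && (cleaned.getLast?.map pvIsSorry == some true)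
      then cleaned
    else cleaned ++ [line]) []
  PySem.Str.join "\n" cleaned ++ "\n"

-- ===== PORT B =====
-- groupby over the empty-filtered list: a sorry-run contributes its first line, any other run all.
def pvCollapse : List String → List String
  | [] => []
  | l :: rest =>
      if pvIsSorry l then l :: pvCollapse (rest.dropWhile pvIsSorry)
      else l :: pvCollapse rest
termination_by ls => ls.length
decreasing_by
  · exact Nat.lt_succ_of_le (List.length_dropWhile_le _ _)
  · simp

def clean_redundant_sorries_py_alt (lines : List String) : String :=
  PySem.Str.join "\n" (pvCollapse (lines.filter (· ≠ ""))) ++ "\n"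

-- ===== PRECONDITION & SPEC =====
def Spec_clean_redundant_sorries_py (lines : List String) (out : String) : Prop := out = clean_redundant_sorries_py_alt lines
instance (lines : List String) (out : String) : Decidable (Spec_clean_redundant_sorries_py lines out) := by unfold Spec_clean_redundant_sorries_py; infer_instance

-- ===== CLAIM (what is proved, stated in full; the proofs are below) =====
def Claim_equal_clean_redundant_sorries_py : Prop := ∀ (lines : List String), Dom_clean_redundant_sorries_py lines → Spec_clean_redundant_sorries_py lines (clean_redundant_sorries_py lines)

-- ===== LEMMAS AND PROOFS =====

-- A's loop body, named for the proofs
def pvStepA (cleaned : List String) (line : String) : List String :=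
  if line = "" then cleaned
  else if pvIsSorry line && !cleaned.isEmpty && (cleaned.getLast?.map pvIsSorry == some true)
    then cleaned
  else cleaned ++ [line]

-- joint description of A's tail result: b says whether the accumulator so far ends in a sorry line
def pvTail : Bool → List String → List String
  | _, [] => []
  | b, l :: rest =>
      if l = "" then pvTail b rest
      else if pvIsSorry l then (if b then pvTail true rest else l :: pvTail true rest)
      else l :: pvTail false rest

def pvLastSorry (acc : List String) : Bool := acc.getLast?.map pvIsSorry == some true

lemma pvStepA_empty (acc : List String) {l : String} (he : l = "") : pvStepA acc l = acc := by
  simp [pvStepA, he]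

lemma pvStepA_skip (acc : List String) {l : String} (he : l ≠ "") (hs : pvIsSorry l = true)
    (hb : pvLastSorry acc = true) : pvStepA acc l = acc := by
  have hne : acc.isEmpty = false := by
    cases acc <;> simp_all [pvLastSorry]
  simp [pvStepA, he, hs, hne, pvLastSorry] at hb ⊢
  exact hb

lemma pvStepA_app_sorry (acc : List String) {l : String} (he : l ≠ "") (hs : pvIsSorry l = true)
    (hb : pvLastSorry acc = false) : pvStepA acc l = acc ++ [l] := by
  simp only [pvLastSorry] at hb
  simp [pvStepA, he, hs, hb]

lemma pvStepA_app (acc : List String) {l : String} (he : l ≠ "") (hs : pvIsSorry l = false) :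
    pvStepA acc l = acc ++ [l] := by
  simp [pvStepA, he, hs]

lemma pvLastSorry_app (acc : List String) (l : String) :
    pvLastSorry (acc ++ [l]) = pvIsSorry l := by
  cases h : pvIsSorry l <;> simp [pvLastSorry, h]

lemma pvFoldl_eq_tail (lines : List String) : ∀ (acc : List String),
    lines.foldl pvStepA acc = acc ++ pvTail (pvLastSorry acc) lines := by
  induction lines with
  | nil => intro acc; simp [pvTail]
  | cons l rest ih =>
    intro acc
    rw [List.foldl_cons]
    by_cases he : l = ""
    · rw [pvStepA_empty acc he, ih acc, pvTail, if_pos he]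
    · by_cases hs : pvIsSorry l = true
      · cases hb : pvLastSorry acc with
        | true =>
          rw [pvStepA_skip acc he hs hb, ih acc, hb, pvTail, if_neg he, if_pos hs, if_pos rfl]
        | false =>
          rw [pvStepA_app_sorry acc he hs hb, ih (acc ++ [l]), pvLastSorry_app, hs,
            pvTail, if_neg he, if_pos hs, if_neg (by simp), List.append_assoc]
          rfl
      · have hs' : pvIsSorry l = false := by simpa using hs
        rw [pvStepA_app acc he hs', ih (acc ++ [l]), pvLastSorry_app, hs',
          pvTail, if_neg he, if_neg (by simp [hs']), List.append_assoc]
        rfl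

lemma pvTail_eq_collapse (ls : List String) :
    pvTail false ls = pvCollapse (ls.filter (· ≠ ""))
    ∧ pvTail true ls = pvCollapse ((ls.filter (· ≠ "")).dropWhile pvIsSorry) := by
  induction ls with
  | nil => simp [pvTail, pvCollapse]
  | cons l rest ih =>
    obtain ⟨ihf, iht⟩ := ih
    by_cases he : l = ""
    · rw [pvTail, pvTail, if_pos he, if_pos he,
        List.filter_cons_of_neg (by simpa using he)]
      exact ⟨ihf, iht⟩
    · rw [List.filter_cons_of_pos (by simpa using he)]
      by_cases hs : pvIsSorry l = true
      · constructor
        · rw [pvTail, if_neg he, if_pos hs, if_neg (by simp), pvCollapse, if_pos hs, iht]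
        · rw [pvTail, if_neg he, if_pos hs, if_pos rfl, List.dropWhile_cons_of_pos hs, iht]
      · constructor
        · rw [pvTail, if_neg he, if_neg (by simp [hs]), pvCollapse,
            if_neg (by simp [hs]), ihf]
        · rw [pvTail, if_neg he, if_neg (by simp [hs]),
            List.dropWhile_cons_of_neg (by simp [hs]), pvCollapse, if_neg (by simp [hs]), ihf]

-- ===== VERDICT (by name: the statement is the Claim_ definition above) =====
theorem clean_redundant_sorries_py_spec : Claim_equal_clean_redundant_sorries_py := by
  intro lines _
  show _ = _
  unfold clean_redundant_sorries_py clean_redundant_sorries_py_alt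
  have hstep : (fun cleaned line =>
      if line = "" then cleaned
      else if pvIsSorry line && !cleaned.isEmpty && (cleaned.getLast?.map pvIsSorry == some true)
        then cleaned
      else cleaned ++ [line]) = pvStepA := rfl
  rw [hstep, pvFoldl_eq_tail lines []]
  have h0 : pvLastSorry [] = false := by simp [pvLastSorry]
  rw [h0, List.nil_append, (pvTail_eq_collapse lines).1]
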